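-- pv_equiv track=rewrite | github.com/EricHuang2FG/ESC180H | Exams/2010.py | add_neighbours
-- ===== SOURCE A (Python) =====
-- def add_neighbours(L):
--     new_list = []
--
--     # handle edge cases
--     if len(L) == 0:
--         return []
--     if len(L) == 1:
--         return L
--     for index, value in enumerate(L):
--         if index == 0:
--             new_list.append(value + L[index + 1])
--         elif index == len(L) - 1:
--             new_list.append(value + L[index - 1])
--         else:
--             new_list.append(value + L[index - 1] + L[index + 1])
--     return new_list
-- ===== SOURCE B (Python) =====
-- def add_neighbours(L):
--     prefix = [0]
--     for v in L:
--         prefix.append(prefix[-1] + v)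
--     n = len(L)
--     return [prefix[min(i + 2, n)] - prefix[max(i - 1, 0)] for i in range(n)]
-- ===== Notes on version B (the rewrite author's own statement) =====
-- stated objective: alternative
-- what changed: Replaces the per-index enumerate loop with position branches by a prefix-sum array built in one pass, from which every output element (endpoints included, no special cases) is a difference of two clamped prefix sums.
import Mathlib
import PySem

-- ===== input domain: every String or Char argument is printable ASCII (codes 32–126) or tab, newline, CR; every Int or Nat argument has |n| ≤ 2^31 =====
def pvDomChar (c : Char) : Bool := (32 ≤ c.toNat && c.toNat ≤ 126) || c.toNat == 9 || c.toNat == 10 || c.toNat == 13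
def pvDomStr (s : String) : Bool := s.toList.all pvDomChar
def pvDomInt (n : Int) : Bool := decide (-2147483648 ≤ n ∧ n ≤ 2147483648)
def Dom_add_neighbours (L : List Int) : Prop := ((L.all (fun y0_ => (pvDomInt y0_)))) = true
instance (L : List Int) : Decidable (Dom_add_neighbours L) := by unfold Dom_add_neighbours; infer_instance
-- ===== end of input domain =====

-- B replaces A's per-index position branches by a prefix-sum array; each output element
-- is a difference of two clamped prefix sums, no endpoint special cases (alternative algorithm).

-- ===== PORT A =====
-- indices index±1 accessed by A are always in range when len(L) ≥ 2, so pyGetD's default 0 is never used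
def add_neighbours (L : List Int) : List Int :=
  if L.length = 0 then []
  else if L.length = 1 then L
  else
    (PySem.List.enumerate L 0).foldl (fun new_list iv =>
      if iv.1 = 0 then new_list ++ [iv.2 + PySem.List.pyGetD L (iv.1 + 1) 0]
      else if iv.1 = (L.length : Int) - 1 then new_list ++ [iv.2 + PySem.List.pyGetD L (iv.1 - 1) 0]
      else new_list ++ [iv.2 + PySem.List.pyGetD L (iv.1 - 1) 0 + PySem.List.pyGetD L (iv.1 + 1) 0]) []

-- ===== PORT B =====
-- the prefix list is always non-empty, so P[-1] is defined, so pyGetD's default 0 is never used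
def add_neighbours_alt (L : List Int) : List Int :=
  let P0 := L.foldl (fun P v => P ++ [PySem.List.pyGetD P (-1) 0 + v]) [(0 : Int)]
  let n : Int := L.length
  (PySem.List.pyRange 0 n 1).map (fun i =>
    PySem.List.pyGetD P0 (min (i + 2) n) 0 - PySem.List.pyGetD P0 (max (i - 1) 0) 0)

-- ===== PRECONDITION & SPEC =====
def Spec_add_neighbours (L : List Int) (out : List Int) : Prop := out = add_neighbours_alt L
instance (L : List Int) (out : List Int) : Decidable (Spec_add_neighbours L out) := by unfold Spec_add_neighbours; infer_instance

-- ===== CLAIM (what is proved, stated in full; the proofs are below) =====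
def Claim_equal_add_neighbours : Prop := ∀ (L : List Int), Dom_add_neighbours L → Spec_add_neighbours L (add_neighbours L)

-- ===== LEMMAS AND PROOFS =====

-- B's prefix loop builds exactly List.scanl (·+·)
theorem pref_foldl_eq_scanl (l : List Int) :
    ∀ (acc : List Int) (x : Int),
      l.foldl (fun P v => P ++ [PySem.List.pyGetD P (-1) 0 + v]) (acc ++ [x])
        = acc ++ List.scanl (· + ·) x l := by
  induction l with
  | nil => intro acc x; simp [List.scanl_nil]
  | cons v t ih =>
    intro acc x
    simp only [List.foldl_cons, PySem.List.pyGetD_neg_one_append_singleton,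
      List.append_assoc, List.singleton_append]
    have := ih (acc ++ [x]) (x + v)
    simpa [List.scanl_cons] using this

theorem scanl_getElem (l : List Int) :
    ∀ (a : Int) (k : Nat) (h : k < (List.scanl (· + ·) a l).length),
      (List.scanl (· + ·) a l)[k] = a + (l.take k).sum := by
  induction l with
  | nil =>
    intro a k h
    simp only [List.scanl_nil, List.length_cons, List.length_nil] at h
    interval_cases k
    simp
  | cons v t ih =>
    intro a k h
    cases k with
    | zero => simp [List.scanl_cons]
    | succ k =>
      simp only [List.scanl_cons, List.getElem_cons_succ, List.take_succ_cons, List.sum_cons]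
      rw [ih (a + v) k (by simpa [List.scanl_cons] using h)]
      ring

-- the three branch values of A via getElem
theorem foldl_if3 {α β : Type} (c1 c2 : β → Prop) [DecidablePred c1] [DecidablePred c2]
    (e1 e2 e3 : β → α) (l : List β) (init : List α) :
    l.foldl (fun acc x => if c1 x then acc ++ [e1 x] else if c2 x then acc ++ [e2 x] else acc ++ [e3 x]) init
      = init ++ l.map (fun x => if c1 x then e1 x else if c2 x then e2 x else e3 x) := by
  induction l generalizing init with
  | nil => simp
  | cons hd tl ih =>
    simp only [List.foldl_cons, List.map_cons]
    split_ifs <;> simp [ih]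

theorem take_sum_succ (L : List Int) (k : Nat) (h : k < L.length) :
    ((L.take (k + 1)).sum : Int) = (L.take k).sum + L[k] := by
  induction L generalizing k with
  | nil => simp at h
  | cons a t ih =>
    cases k with
    | zero => simp
    | succ k =>
      simp only [List.take_succ_cons, List.sum_cons, List.getElem_cons_succ]
      rw [ih k (by simpa using h)]
      ring

theorem add_neighbours_alt_get (L : List Int) (i : Nat) (hi : i < L.length) :
    (add_neighbours_alt L).length = L.length ∧
    (add_neighbours_alt L)[i]'(by
        simp [add_neighbours_alt, PySem.List.length_pyRange_one]; omega) =
      (L.take (min (i + 2) L.length)).sum - (L.take (i - 1)).sum := by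
  have hpref : L.foldl (fun P v => P ++ [PySem.List.pyGetD P (-1) 0 + v]) [(0 : Int)]
      = List.scanl (· + ·) 0 L := by
    simpa using pref_foldl_eq_scanl L [] 0
  have hlen : (List.scanl (· + ·) (0 : Int) L).length = L.length + 1 := by
    simp [List.length_scanl]
  constructor
  · simp [add_neighbours_alt, PySem.List.length_pyRange_one]
  · simp only [add_neighbours_alt, hpref, List.getElem_map,
      PySem.List.getElem_pyRange_one]
    have hmin : min (((0:Int) + i) + 2) (L.length : Int) = ((min (i + 2) L.length : Nat) : Int) := by
      omega
    have hmax : max (((0:Int) + i) - 1) 0 = (((i - 1 : Nat)) : Int) := by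
      omega
    rw [hmin, hmax]
    rw [PySem.List.pyGetD_eq_getElem _ _ (by omega) (by push_cast; omega)]
    rw [PySem.List.pyGetD_eq_getElem _ _ (by omega) (by omega)]
    rw [scanl_getElem L 0 _ (by omega), scanl_getElem L 0 _ (by omega)]
    simp only [Int.toNat_natCast, zero_add]

theorem alt_single (x : Int) : add_neighbours_alt [x] = [x] := by
  have h01 : PySem.List.pyRange 0 1 1 = [0] := by decide
  simp only [add_neighbours_alt, List.foldl_cons, List.foldl_nil, List.length_cons,
    List.length_nil, Nat.zero_add, Nat.cast_one, h01, List.map_cons, List.map_nil]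
  norm_num [PySem.List.pyGetD_neg_one, PySem.List.pyGetD_ofNat', PySem.List.pyGetD_zero]

theorem add_neighbours_eq_alt (L : List Int) : add_neighbours L = add_neighbours_alt L := by
  by_cases h0 : L.length = 0
  · cases L with
    | nil => rfl
    | cons a t => simp at h0
  by_cases h1 : L.length = 1
  · obtain ⟨x, rfl⟩ : ∃ x, L = [x] := by
      cases L with
      | nil => simp at h1
      | cons a t =>
        cases t with
        | nil => exact ⟨a, rfl⟩
        | cons b u => simp at h1
    rw [alt_single]
    simp [add_neighbours]
  -- length ≥ 2
  have hn : 2 ≤ L.length := by omega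
  unfold add_neighbours
  rw [if_neg h0, if_neg h1, foldl_if3]
  apply List.ext_getElem
  · have := (add_neighbours_alt_get L 0 (by omega)).1
    simp [this, PySem.List.length_enumerate]
  · intro i hi hi'
    simp only [PySem.List.length_enumerate, List.nil_append, List.length_map] at hi
    rw [(add_neighbours_alt_get L i hi).2]
    simp only [List.nil_append, List.getElem_map, PySem.List.getElem_enumerate]
    by_cases hz : i = 0
    · subst hz
      rw [if_pos (by norm_num)]
      rw [show (0:Int) + ((0:Nat):Int) + 1 = ((1:Nat) : Int) by norm_num]
      rw [PySem.List.pyGetD_natCast, List.getD_eq_getElem L 0 (by omega)]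
      rw [show min (0 + 2) L.length = 2 by omega]
      have h2 : ((L.take 2).sum : Int) = L[0] + L[1] := by
        rw [take_sum_succ L 1 (by omega), take_sum_succ L 0 (by omega)]
        simp
        rfl
      rw [h2]
      simp
      rfl
    · have c2 : (0:Int) + ↑i - 1 = ((i - 1 : Nat) : Int) := by omega
      have c1 : (0:Int) + ↑i + 1 = ((i + 1 : Nat) : Int) := by push_cast; ring
      by_cases hL : i = L.length - 1
      · rw [if_neg (by omega), if_pos (by omega)]
        rw [c2, PySem.List.pyGetD_natCast, List.getD_eq_getElem L 0 (by omega)]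
        rw [show min (i + 2) L.length = L.length by omega]
        have t1 : ((L.take L.length).sum : Int) = (L.take (L.length - 1)).sum + L[L.length - 1] := by
          have := take_sum_succ L (L.length - 1) (by omega)
          rw [show L.length - 1 + 1 = L.length by omega] at this; exact this
        have t2 : ((L.take (L.length - 1)).sum : Int) = (L.take (i - 1)).sum + L[i - 1] := by
          have := take_sum_succ L (i - 1) (by omega)
          rw [show i - 1 + 1 = L.length - 1 by omega] at this; exact this
        rw [t1, t2]
        have eL : L[i] = L[L.length - 1]'(by omega) := by congr 1
        rw [eL]; ring
      · rw [if_neg (by omega), if_neg (by omega)]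
        rw [c2, c1, PySem.List.pyGetD_natCast, PySem.List.pyGetD_natCast,
            List.getD_eq_getElem L 0 (by omega), List.getD_eq_getElem L 0 (by omega)]
        rw [show min (i + 2) L.length = i + 2 by omega]
        have s2 : ((L.take (i + 2)).sum : Int) = (L.take (i + 1)).sum + L[i + 1] := by
          have := take_sum_succ L (i + 1) (by omega)
          rw [show i + 1 + 1 = i + 2 by omega] at this; exact this
        have s1 : ((L.take (i + 1)).sum : Int) = (L.take i).sum + L[i] :=
          take_sum_succ L i (by omega)
        have s0 : ((L.take i).sum : Int) = (L.take (i - 1)).sum + L[i - 1] := by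
          have := take_sum_succ L (i - 1) (by omega)
          rw [show i - 1 + 1 = i by omega] at this; exact this
        rw [s2, s1, s0]
        ring

-- ===== VERDICT (by name: the statement is the Claim_ definition above) =====
theorem add_neighbours_spec : Claim_equal_add_neighbours := by
  intro L _
  exact add_neighbours_eq_alt L
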